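-- pv_equiv track=rewrite | github.com/imgwho/cwtwb | src/cwtwb/authoring_run.py | _choose_geo
-- ===== SOURCE A (Python) =====
-- def _choose_geo(fields: dict[str, list[str]], fallback: str = "State/Province") -> str:
--     geo_fields = fields.get("geo_fields", [])
--     if not geo_fields:
--         return fallback
--
--     preferred_order = [
--         "region",
--         "state/province",
--         "state",
--         "province",
--         "country/region",
--         "country",
--         "city",
--         "postal code",
--         "zip code",
--         "zipcode",
--         "latitude",
--         "longitude",
--         "lat",
--         "lon",
--     ]
--     ranked = {
--         name: index
--         for index, name in enumerate(preferred_order)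
--     }
--
--     def _rank(field_name: str) -> tuple[int, str]:
--         normalized = " ".join(
--             field_name.casefold().replace("_", " ").replace("-", " ").split()
--         )
--         return (ranked.get(normalized, len(preferred_order)), field_name)
--
--     return sorted(geo_fields, key=_rank)[0]
-- ===== SOURCE B (Python) =====
-- def _choose_geo(fields: dict[str, list[str]], fallback: str = "State/Province") -> str:
--     geo_fields = fields.get("geo_fields", [])
--     if not geo_fields:
--         return fallback
--
--     preferred_order = [
--         "region",
--         "state/province",
--         "state",
--         "province",
--         "country/region",
--         "country",
--         "city",
--         "postal code",
--         "zip code",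
--         "zipcode",
--         "latitude",
--         "longitude",
--         "lat",
--         "lon",
--     ]
--
--     def _normalize(field_name: str) -> str:
--         return " ".join(
--             field_name.casefold().replace("_", " ").replace("-", " ").split()
--         )
--
--     # group fields by normalized name, keeping the lexicographically smallest original
--     best_by_norm = {}
--     for name in geo_fields:
--         key = _normalize(name)
--         cur = best_by_norm.get(key)
--         if cur is None or name < cur:
--             best_by_norm[key] = name
--
--     # walk the priority list once; first hit wins
--     for preferred in preferred_order:
--         if preferred in best_by_norm:
--             return best_by_norm[preferred]
--
--     return min(geo_fields)
-- ===== Notes on version B (the rewrite author's own statement) =====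
-- stated objective: idiomatic
-- what changed: A sorts all of geo_fields by a (rank, name) tuple key and takes element 0; B never sorts: it builds a dict grouping each normalized name to its lexicographically smallest original field in one pass, then walks the priority list once and returns the first hit, falling back to min(geo_fields).
import Mathlib
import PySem

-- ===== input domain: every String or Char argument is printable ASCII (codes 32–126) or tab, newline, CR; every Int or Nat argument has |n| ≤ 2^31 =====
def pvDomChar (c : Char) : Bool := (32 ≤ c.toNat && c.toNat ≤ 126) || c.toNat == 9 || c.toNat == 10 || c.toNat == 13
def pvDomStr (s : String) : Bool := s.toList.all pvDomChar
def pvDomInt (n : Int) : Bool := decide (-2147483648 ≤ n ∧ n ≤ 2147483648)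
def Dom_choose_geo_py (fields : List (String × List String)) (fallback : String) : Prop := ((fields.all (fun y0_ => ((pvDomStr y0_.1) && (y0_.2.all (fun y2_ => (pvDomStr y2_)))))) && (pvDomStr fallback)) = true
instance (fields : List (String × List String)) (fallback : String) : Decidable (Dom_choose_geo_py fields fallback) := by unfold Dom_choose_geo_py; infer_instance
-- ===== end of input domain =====

-- B replaces A's full stable sort of geo_fields under the (rank, name) key by a one-pass
-- grouping dict (normalized name ↦ smallest original name) followed by a single walk of
-- the priority list, falling back to min(geo_fields).

-- ===== PORT A =====
-- helpers shared verbatim by both Pythons: the literal priority list and the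
-- normalization " ".join(name.casefold().replace("_", " ").replace("-", " ").split())
-- (casefold ported as PySem.Str.lower, exact on the ASCII domain)
def pvPreferred : List String :=
  ["region", "state/province", "state", "province", "country/region", "country",
   "city", "postal code", "zip code", "zipcode", "latitude", "longitude", "lat", "lon"]

def pvNorm (s : String) : String :=
  PySem.Str.join " " (PySem.Str.split₀
    (PySem.Str.replace (PySem.Str.replace (PySem.Str.lower s) "_" " ") "-" " "))

def choose_geo_py (fields : List (String × List String)) (fallback : String) : String :=
  let geo_fields := ((fields.find? (fun p => p.1 == "geo_fields")).map Prod.snd).getD []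
  if geo_fields = [] then fallback
  else
    let ranked := (PySem.List.enumerate pvPreferred 0).foldl
      (fun d p => d.insert p.2 p.1) PySem.Dict.empty
    let rank1 : String → Int := fun name => ranked.getD (pvNorm name) (pvPreferred.length : Int)
    (PySem.List.sorted2 geo_fields rank1 (fun n => n) false).headD fallback

-- ===== PORT B =====
def pvBestByNorm (geo : List String) : PySem.Dict String String :=
  geo.foldl (fun d name =>
    let key := pvNorm name
    match d.get? key with
    | none => d.insert key name
    | some cur => if name < cur then d.insert key name else d) PySem.Dict.empty

def choose_geo_py_alt (fields : List (String × List String)) (fallback : String) : String :=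
  let geo_fields := ((fields.find? (fun p => p.1 == "geo_fields")).map Prod.snd).getD []
  if geo_fields = [] then fallback
  else
    let best := pvBestByNorm geo_fields
    match pvPreferred.findSome? (fun p => best.get? p) with
    | some name => name
    | none => (PySem.List.min? geo_fields (fun x => x)).getD fallback

-- ===== PRECONDITION & SPEC =====
def Spec_choose_geo_py (fields : List (String × List String)) (fallback : String) (out : String) : Prop := out = choose_geo_py_alt fields fallback
instance (fields : List (String × List String)) (fallback : String) (out : String) : Decidable (Spec_choose_geo_py fields fallback out) := by unfold Spec_choose_geo_py; infer_instance

-- ===== CLAIM (what is proved, stated in full; the proofs are below) =====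
def Claim_equal_choose_geo_py : Prop := ∀ (fields : List (String × List String)) (fallback : String), Dom_choose_geo_py fields fallback → Spec_choose_geo_py fields fallback (choose_geo_py fields fallback)

-- ===== LEMMAS AND PROOFS =====

def pvRk (s : String) : Int :=
  match PySem.List.index? pvPreferred (pvNorm s) with
  | some j => (j : Int)
  | none => 14

def pvRankedLit : PySem.Dict String Int :=
  PySem.Dict.mk [("region", 0), ("state/province", 1), ("state", 2), ("province", 3),
    ("country/region", 4), ("country", 5), ("city", 6), ("postal code", 7), ("zip code", 8),
    ("zipcode", 9), ("latitude", 10), ("longitude", 11), ("lat", 12), ("lon", 13)]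

theorem pvRankedLit_eq :
    (PySem.List.enumerate pvPreferred 0).foldl (fun d p => d.insert p.2 p.1) PySem.Dict.empty
      = pvRankedLit := by decide

theorem pv_get?_mk_nil {ν : Type} (t : String) : (PySem.Dict.mk ([] : List (String × ν))).get? t = none := rfl

set_option maxHeartbeats 2000000 in
theorem pv_rank_eq_aux (t : String) :
    pvRankedLit.getD t ((pvPreferred.length : Nat) : Int)
      = (match PySem.List.index? pvPreferred t with
         | some j => (j : Int)
         | none => 14) := by
  by_cases h1 : "region" = t
  · subst h1; decide
  by_cases h2 : "state/province" = t
  · subst h2; decide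
  by_cases h3 : "state" = t
  · subst h3; decide
  by_cases h4 : "province" = t
  · subst h4; decide
  by_cases h5 : "country/region" = t
  · subst h5; decide
  by_cases h6 : "country" = t
  · subst h6; decide
  by_cases h7 : "city" = t
  · subst h7; decide
  by_cases h8 : "postal code" = t
  · subst h8; decide
  by_cases h9 : "zip code" = t
  · subst h9; decide
  by_cases h10 : "zipcode" = t
  · subst h10; decide
  by_cases h11 : "latitude" = t
  · subst h11; decide
  by_cases h12 : "longitude" = t
  · subst h12; decide
  by_cases h13 : "lat" = t
  · subst h13; decide
  by_cases h14 : "lon" = t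
  · subst h14; decide
  simp only [PySem.Dict.getD, pvRankedLit, PySem.Dict.get?_mk_cons, pv_get?_mk_nil,
    pvPreferred, PySem.List.index?_eq_idxOf?, List.idxOf?_cons, List.idxOf?_nil, beq_iff_eq,
    h1, h2, h3, h4, h5, h6, h7, h8, h9, h10, h11, h12, h13, h14, if_false]
  norm_num

def pvBefore (rk : String → Int) (a b : String) : Bool :=
  decide (rk a < rk b) || (!decide (rk b < rk a) && decide (a < b))

theorem pvBefore_false_iff (rk : String → Int) (a b : String) :
    pvBefore rk a b = false ↔ ¬ rk a < rk b ∧ (rk b < rk a ∨ ¬ a < b) := by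
  simp only [pvBefore, Bool.or_eq_false_iff, Bool.and_eq_false_iff, Bool.not_eq_false',
    decide_eq_false_iff_not, decide_eq_true_eq]

theorem pvBefore_irrefl (rk : String → Int) (a : String) : pvBefore rk a a = false := by
  simp only [pvBefore, lt_irrefl, decide_false, Bool.not_false, Bool.true_and, Bool.or_false]

theorem pvBefore_trans (rk : String → Int) (a b c : String) :
    pvBefore rk a b = true → pvBefore rk b c = true → pvBefore rk a c = true := by
  simp only [pvBefore, Bool.or_eq_true, Bool.and_eq_true, Bool.not_eq_true',
    decide_eq_true_eq, decide_eq_false_iff_not]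
  rintro (hab | ⟨hab1, hab2⟩) (hbc | ⟨hbc1, hbc2⟩)
  · exact Or.inl (lt_trans hab hbc)
  · exact Or.inl (lt_of_lt_of_le hab (not_lt.1 hbc1))
  · exact Or.inl (lt_of_le_of_lt (not_lt.1 hab1) hbc)
  · exact Or.inr ⟨not_lt.2 (le_trans (not_lt.1 hab1) (not_lt.1 hbc1)), lt_trans hab2 hbc2⟩

theorem pvBefore_eq_of_not (rk : String → Int) (a b : String) :
    pvBefore rk a b = false → pvBefore rk b a = false → a = b := by
  rw [pvBefore_false_iff, pvBefore_false_iff]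
  rintro ⟨h1, h2⟩ ⟨h3, h4⟩
  rcases h2 with h2 | h2
  · exact absurd h2 h3
  rcases h4 with h4 | h4
  · exact absurd h4 h1
  exact le_antisymm (not_lt.1 h4) (not_lt.1 h2)

def pvMStep (o : Option String) (x : String) : Option String :=
  match o with
  | none => some x
  | some m => if x < m then some x else some m

theorem min?_id_eq_foldl (ys : List String) :
    PySem.List.min? ys (fun x => x) = ys.foldl pvMStep none := by
  rw [PySem.List.min?]
  refine PySem.List.foldl_congr_mem ys _ pvMStep none ?_
  intro acc x _
  cases acc <;> rfl

def pvBStep (d : PySem.Dict String String) (name : String) : PySem.Dict String String :=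
  match d.get? (pvNorm name) with
  | none => d.insert (pvNorm name) name
  | some cur => if name < cur then d.insert (pvNorm name) name else d

theorem pvBestByNorm_eq (geo : List String) :
    pvBestByNorm geo = geo.foldl pvBStep PySem.Dict.empty := rfl

theorem pvBStep_get?_same (d : PySem.Dict String String) (x : String) :
    (pvBStep d x).get? (pvNorm x) = pvMStep (d.get? (pvNorm x)) x := by
  unfold pvBStep
  cases hc : d.get? (pvNorm x) with
  | none => simp only [pvMStep, PySem.Dict.get?_insert_self]
  | some cur =>
    simp only [pvMStep]
    split
    · rw [PySem.Dict.get?_insert_self]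
    · rw [hc]

theorem pvBStep_get?_other (d : PySem.Dict String String) (x k : String) (hk : ¬ pvNorm x = k) :
    (pvBStep d x).get? k = d.get? k := by
  unfold pvBStep
  cases hc : d.get? (pvNorm x) with
  | none =>
    simp only [hc]
    exact PySem.Dict.get?_insert_of_ne _ _ (fun h => hk h.symm)
  | some cur =>
    simp only [hc]
    split
    · exact PySem.Dict.get?_insert_of_ne _ _ (fun h => hk h.symm)
    · rfl

theorem bestByNorm_get_aux :
    ∀ (l : List String) (d : PySem.Dict String String) (k : String),
      (l.foldl pvBStep d).get? k
        = (l.filter (fun x => pvNorm x == k)).foldl pvMStep (d.get? k) := by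
  intro l
  induction l with
  | nil => intro d k; rfl
  | cons x xs ih =>
    intro d k
    simp only [List.foldl_cons, List.filter_cons]
    rw [ih]
    by_cases hk : pvNorm x = k
    · subst hk
      simp only [beq_self_eq_true, if_true, List.foldl_cons]
      rw [pvBStep_get?_same]
    · have hbeq : (pvNorm x == k) = false := beq_eq_false_iff_ne.2 hk
      simp only [hbeq, Bool.false_eq_true, if_false]
      rw [pvBStep_get?_other d x k hk]

theorem bestByNorm_get (geo : List String) (k : String) :
    (pvBestByNorm geo).get? k
      = PySem.List.min? (geo.filter (fun x => pvNorm x == k)) (fun x => x) := by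
  rw [pvBestByNorm_eq, bestByNorm_get_aux, min?_id_eq_foldl]
  rfl

def pvMinStepG {α : Type} (before : α → α → Bool) (o : Option α) (x : α) : Option α :=
  match o with
  | none => some x
  | some m => if before x m then some x else some m

theorem head?_insertBy {α : Type} (before : α → α → Bool) (x : α) (acc : List α) :
    (PySem.List.insertBy before x acc).head? = pvMinStepG before acc.head? x := by
  cases acc with
  | nil => simp [PySem.List.insertBy, pvMinStepG]
  | cons h t =>
    simp only [PySem.List.insertBy, pvMinStepG, List.head?_cons]
    split <;> simp_all

theorem head?_foldl_insertBy {α : Type} (before : α → α → Bool) (xs : List α) :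
    ∀ acc : List α,
      ((xs.foldl (fun a x => PySem.List.insertBy before x a) acc).head?)
        = xs.foldl (pvMinStepG before) acc.head? := by
  induction xs with
  | nil => intro acc; rfl
  | cons x xs ih =>
    intro acc
    simp only [List.foldl_cons]
    rw [ih, head?_insertBy]

theorem foldl_minStep_mem {α : Type} (before : α → α → Bool) :
    ∀ (xs : List α) (o : Option α) (m : α),
      xs.foldl (pvMinStepG before) o = some m → o = some m ∨ m ∈ xs := by
  intro xs
  induction xs with
  | nil => intro o m h; exact Or.inl h
  | cons x xs ih =>
    intro o m h
    rcases ih (pvMinStepG before o x) m h with h' | h'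
    · cases o with
      | none => right; simp [pvMinStepG] at h'; simp [h']
      | some a =>
        simp only [pvMinStepG] at h'
        split at h'
        · right; simp at h'; simp [h']
        · left; exact h'
    · right; exact List.mem_cons_of_mem _ h'

theorem foldl_minStep_vs_acc {α : Type} (before : α → α → Bool)
    (htrans : ∀ a b c, before a b = true → before b c = true → before a c = true) :
    ∀ (xs : List α) (a m : α),
      xs.foldl (pvMinStepG before) (some a) = some m → m = a ∨ before m a = true := by
  intro xs
  induction xs with
  | nil => intro a m h; left; simpa using h.symm
  | cons x xs ih =>
    intro a m h
    simp only [List.foldl_cons, pvMinStepG] at h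
    split at h
    · rcases ih x m h with h' | h'
      · right; subst h'; assumption
      · right; exact htrans _ _ _ h' (by assumption)
    · exact ih a m h

theorem foldl_minStep_min {α : Type} (before : α → α → Bool)
    (htrans : ∀ a b c, before a b = true → before b c = true → before a c = true)
    (hirrefl : ∀ a, before a a = false) :
    ∀ (xs : List α) (o : Option α) (m : α),
      xs.foldl (pvMinStepG before) o = some m → ∀ y ∈ xs, before y m = false := by
  have hasymm : ∀ a b, before a b = true → before b a = false := by
    intro a b h
    by_contra hc
    have h2 : before b a = true := by revert hc; cases before b a <;> simp
    have h3 := htrans a b a h h2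
    rw [hirrefl] at h3
    exact Bool.false_ne_true h3
  intro xs
  induction xs with
  | nil => intro o m _ y hy; cases hy
  | cons x xs ih =>
    intro o m h y hy
    rcases List.mem_cons.1 hy with hyx | hy'
    · rw [hyx]
      have hstep : xs.foldl (pvMinStepG before) (pvMinStepG before o x) = some m := h
      cases ho : pvMinStepG before o x with
      | none => exact absurd ho (by cases o <;> simp only [pvMinStepG] <;> (try split) <;> simp)
      | some a =>
        rw [ho] at hstep
        have hxa : a = x ∨ before x a = false := by
          cases o with
          | none => left; simpa [pvMinStepG] using ho.symm
          | some b =>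
            simp only [pvMinStepG] at ho
            split at ho
            · left; exact (Option.some.inj ho).symm
            · right
              have hab : a = b := (Option.some.inj ho).symm
              subst hab
              simpa using ‹¬ before x a = true›
        rcases foldl_minStep_vs_acc before htrans xs a m hstep with hma | hma
        · rcases hxa with hxa | hxa
          · rw [hma.trans hxa]; exact hirrefl x
          · rw [hma]; exact hxa
        · rcases hxa with hxa | hxa
          · rw [← hxa]; exact hasymm _ _ hma
          · by_contra hc
            have hxm : before x m = true := by revert hc; cases before x m <;> simp
            have hfa : before x a = true := htrans _ _ _ hxm hma
            rw [hfa] at hxa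
            exact absurd hxa (by simp)
    · exact ih (pvMinStepG before o x) m h y hy'

-- first-success characterization of findSome?
theorem findSome?_eq_some_first {α β : Type} (f : α → Option β) :
    ∀ (l : List α) (r : β), l.findSome? f = some r →
      ∃ k, ∃ hk : k < l.length, f l[k] = some r ∧ ∀ j (hj : j < k), f l[j] = none := by
  intro l
  induction l with
  | nil => intro r h; simp at h
  | cons x xs ih =>
    intro r h
    rw [List.findSome?_cons] at h
    cases hx : f x with
    | some v =>
      rw [hx] at h
      exact ⟨0, by simp, by simpa [hx] using h, fun j hj => absurd hj (Nat.not_lt_zero j)⟩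
    | none =>
      rw [hx] at h
      obtain ⟨k, hk, h1, h2⟩ := ih r h
      refine ⟨k + 1, by simpa using Nat.succ_lt_succ hk, by simpa using h1, ?_⟩
      intro j hj
      cases j with
      | zero => simpa using hx
      | succ j => simpa using h2 j (by omega)

theorem pvPreferred_length : pvPreferred.length = 14 := by decide

-- no field of geo normalizes to k  ↔  the group lookup at k is empty
theorem bestByNorm_none (geo : List String) (k : String)
    (h : (pvBestByNorm geo).get? k = none) :
    ∀ y ∈ geo, pvNorm y ≠ k := by
  rw [bestByNorm_get, PySem.List.min?_eq_none_iff] at h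
  intro y hy hn
  have : y ∈ geo.filter (fun x => pvNorm x == k) :=
    List.mem_filter.2 ⟨hy, by simp [hn]⟩
  rw [h] at this
  cases this

theorem pv_rank_eq (s : String) :
    pvRankedLit.getD (pvNorm s) ((pvPreferred.length : Nat) : Int) = pvRk s := by
  unfold pvRk
  exact pv_rank_eq_aux (pvNorm s)

theorem branch_eq (geo : List String) (fallback : String) (hg : ¬ geo = []) :
    (PySem.List.sorted2 geo
        (fun name => ((PySem.List.enumerate pvPreferred 0).foldl
            (fun d p => d.insert p.2 p.1) PySem.Dict.empty).getD (pvNorm name)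
          (pvPreferred.length : Int)) (fun n => n) false).headD fallback
      = (match pvPreferred.findSome? (fun p => (pvBestByNorm geo).get? p) with
         | some name => name
         | none => (PySem.List.min? geo (fun x => x)).getD fallback) := by
  rw [pvRankedLit_eq]
  rw [show (fun name => pvRankedLit.getD (pvNorm name) (pvPreferred.length : Int)) = pvRk
    from funext pv_rank_eq]
  -- A's head is the first lexicographic (rank, name) minimum
  have hshape : PySem.List.sorted2 geo pvRk (fun n => n) false
      = geo.foldl (fun a x => PySem.List.insertBy (pvBefore pvRk) x a) [] := rfl
  have hperm := PySem.List.sorted2_perm geo pvRk (fun n => n) false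
  have hne : PySem.List.sorted2 geo pvRk (fun n => n) false ≠ [] := by
    intro h0
    exact hg (h0 ▸ hperm).symm.eq_nil
  obtain ⟨m, t, hs⟩ := List.exists_cons_of_ne_nil hne
  have hfold : geo.foldl (pvMinStepG (pvBefore pvRk)) none = some m := by
    have := head?_foldl_insertBy (pvBefore pvRk) geo []
    rw [← hshape, hs] at this
    exact this.symm
  have hmem : m ∈ geo := by
    rcases foldl_minStep_mem (pvBefore pvRk) geo none m hfold with h' | h'
    · cases h'
    · exact h'
  have hmin : ∀ y ∈ geo, pvBefore pvRk y m = false :=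
    foldl_minStep_min (pvBefore pvRk) (pvBefore_trans pvRk) (pvBefore_irrefl pvRk)
      geo none m hfold
  rw [hs, List.headD_cons]
  -- B's branches
  cases hf : pvPreferred.findSome? (fun p => (pvBestByNorm geo).get? p) with
  | some r =>
    obtain ⟨k, hk, hfk, hprev⟩ := findSome?_eq_some_first _ pvPreferred r hf
    rw [bestByNorm_get] at hfk
    have hrmem' := PySem.List.min?_mem hfk
    have hrgeo : r ∈ geo := (List.mem_filter.1 hrmem').1
    have hrnorm : pvNorm r = pvPreferred[k] := by
      have := (List.mem_filter.1 hrmem').2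
      simpa using this
    have hrmin : ∀ y ∈ geo, pvNorm y = pvPreferred[k] → r ≤ y := by
      intro y hy hyn
      have hymem : y ∈ geo.filter (fun x => pvNorm x == pvPreferred[k]) :=
        List.mem_filter.2 ⟨hy, by simp [hyn]⟩
      exact PySem.List.min?_isMin hfk y hymem
    have hnone : ∀ j (hj : j < k), ∀ y ∈ geo, pvNorm y ≠ pvPreferred[j] := by
      intro j hj
      exact bestByNorm_none geo pvPreferred[j] (hprev j hj)
    -- index of pvNorm r in pvPreferred is exactly k
    have hidx : PySem.List.index? pvPreferred (pvNorm r) = some k := by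
      rw [PySem.List.index?_eq_some_iff]
      refine ⟨pvPreferred.take k, pvPreferred.drop (k + 1), ?_, List.length_take_of_le (le_of_lt hk), ?_⟩
      · rw [hrnorm]
        conv_lhs => rw [← List.take_append_drop k pvPreferred]
        rw [List.drop_eq_getElem_cons hk]
      · intro hmem'
        obtain ⟨j, hj, hje⟩ := List.mem_iff_getElem.1 hmem'
        rw [List.length_take_of_le (le_of_lt hk)] at hj
        rw [List.getElem_take] at hje
        exact hnone j (by omega) r hrgeo hje.symm
    have hrkr : pvRk r = (k : Int) := by
      unfold pvRk
      rw [hidx]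
    have hBmin : ∀ y ∈ geo, pvBefore pvRk y r = false := by
      intro y hy
      rw [pvBefore_false_iff, hrkr]
      cases hidxy : PySem.List.index? pvPreferred (pvNorm y) with
      | none =>
        have hrky : pvRk y = 14 := by unfold pvRk; rw [hidxy]
        rw [hrky]
        have hk14 : k < 14 := pvPreferred_length ▸ hk
        constructor
        · intro hlt
          have hlt' : (14:Int) ≤ (k:Int) := le_of_lt hlt
          omega
        · left; exact_mod_cast hk14
      | some j =>
        have hrky : pvRk y = (j : Int) := by unfold pvRk; rw [hidxy]
        rw [hrky]
        obtain ⟨hjlen, hje, -⟩ := PySem.List.getElem_of_index?_eq_some hidxy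
        rcases lt_trichotomy j k with hjk | hjk | hjk
        · exact absurd hje.symm (hnone j hjk y hy)
        · subst hjk
          have hle : r ≤ y := hrmin y hy hje.symm
          exact ⟨lt_irrefl _, Or.inr (not_lt.2 hle)⟩
        · constructor
          · intro hlt
            have : j < k := by exact_mod_cast hlt
            omega
          · left; exact_mod_cast hjk
    have hrm : pvBefore pvRk r m = false := hmin r hrgeo
    have hmr : pvBefore pvRk m r = false := hBmin m hmem
    exact pvBefore_eq_of_not pvRk m r hmr hrm
  | none =>
    rw [List.findSome?_eq_none_iff] at hf
    have hall : ∀ y ∈ geo, pvRk y = 14 := by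
      intro y hy
      unfold pvRk
      cases hidxy : PySem.List.index? pvPreferred (pvNorm y) with
      | none => rfl
      | some j =>
        obtain ⟨hjlen, hje, -⟩ := PySem.List.getElem_of_index?_eq_some hidxy
        have := bestByNorm_none geo (pvPreferred[j])
          (hf (pvPreferred[j]) (List.getElem_mem hjlen)) y hy
        exact absurd hje.symm this
    cases hmq : PySem.List.min? geo (fun x => x) with
    | none => exact absurd ((PySem.List.min?_eq_none_iff geo _).1 hmq) hg
    | some r =>
      have hrgeo : r ∈ geo := PySem.List.min?_mem hmq
      have hrmin : ∀ y ∈ geo, r ≤ y := by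
        intro y hy
        exact PySem.List.min?_isMin hmq y hy
      have hBmin : ∀ y ∈ geo, pvBefore pvRk y r = false := by
        intro y hy
        rw [pvBefore_false_iff, hall y hy, hall r hrgeo]
        exact ⟨lt_irrefl _, Or.inr (not_lt.2 (hrmin y hy))⟩
      have hrm : pvBefore pvRk r m = false := hmin r hrgeo
      have hmr : pvBefore pvRk m r = false := hBmin m hmem
      simp only [Option.getD_some]
      exact pvBefore_eq_of_not pvRk m r hmr hrm


theorem main_eq (fields : List (String × List String)) (fallback : String) :
    choose_geo_py fields fallback = choose_geo_py_alt fields fallback := by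
  unfold choose_geo_py choose_geo_py_alt
  by_cases hg : ((fields.find? (fun p => p.1 == "geo_fields")).map Prod.snd).getD [] = []
  · simp only [hg]
    rfl
  · simp only [if_neg hg]
    exact branch_eq _ fallback hg

-- ===== VERDICT (by name: the statement is the Claim_ definition above) =====
theorem choose_geo_py_spec : Claim_equal_choose_geo_py := by
  intro fields fallback _
  exact main_eq fields fallback
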